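-- pv_equiv track=rewrite | github.com/kimseungdae/ai-app-factory | src/agents/design_system_generator.py | _generate_brand_voice
-- ===== SOURCE A (Python) =====
-- from typing import Dict, List, Any, Optional, Tuple
--
-- def _generate_brand_voice(traits: List[str]) -> str:
--     """Generate brand voice description"""
--     if not traits:
--         return 'Professional, helpful, and user-focused'
--
--     voice_elements = []
--     for trait in traits[:3]:
--         trait_lower = trait.lower()
--         if 'simple' in trait_lower or 'easy' in trait_lower:
--             voice_elements.append('clear and straightforward')
--         elif 'professional' in trait_lower:
--             voice_elements.append('professional and authoritative')
--         elif 'friendly' in trait_lower or 'warm' in trait_lower: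
--             voice_elements.append('friendly and approachable')
--         elif 'efficient' in trait_lower:
--             voice_elements.append('direct and efficient')
--
--     if not voice_elements:
--         voice_elements = ['professional', 'helpful', 'user-focused']
--
--     return ', '.join(voice_elements)
-- ===== SOURCE B (Python) =====
-- _PHRASES = ['clear and straightforward', 'professional and authoritative',
--             'friendly and approachable', 'direct and efficient']
-- _KEYWORDS = [('simple', 0), ('easy', 0), ('professional', 1),
--              ('friendly', 2), ('warm', 2), ('efficient', 3)]
--
-- def _collect(traits, budget):
--     """Recursively gather phrases: each trait contributes the phrase of its
--     highest-priority (minimum-index) matching category, if any."""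
--     if budget == 0 or not traits:
--         return []
--     tl = traits[0].lower()
--     cats = [c for k, c in _KEYWORDS if k in tl]
--     head = [_PHRASES[min(cats)]] if cats else []
--     return head + _collect(traits[1:], budget - 1)
--
-- def _generate_brand_voice(traits):
--     """Generate brand voice description"""
--     if not traits:
--         return 'Professional, helpful, and user-focused'
--     parts = _collect(traits, 3)
--     if not parts:
--         parts = ['professional', 'helpful', 'user-focused']
--     return ', '.join(parts)
-- ===== Notes on version B (the rewrite author's own statement) =====
-- stated objective: alternative
-- what changed: Instead of A's short-circuiting elif chain in a loop, B recurses over the list with a budget and, per trait, computes ALL matching keyword categories at once and selects the highest-priority one via min, indexing a phrase table.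
import Mathlib
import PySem

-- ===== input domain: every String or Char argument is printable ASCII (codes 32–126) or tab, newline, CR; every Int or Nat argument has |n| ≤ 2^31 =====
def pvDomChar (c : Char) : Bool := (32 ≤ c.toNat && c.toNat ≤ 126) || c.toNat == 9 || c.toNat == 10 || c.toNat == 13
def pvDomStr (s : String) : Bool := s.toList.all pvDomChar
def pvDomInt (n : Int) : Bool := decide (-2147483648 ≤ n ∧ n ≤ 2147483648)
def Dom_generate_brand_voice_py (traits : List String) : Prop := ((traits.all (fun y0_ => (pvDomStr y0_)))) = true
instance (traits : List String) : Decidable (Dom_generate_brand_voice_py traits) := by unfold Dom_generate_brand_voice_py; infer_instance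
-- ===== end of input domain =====

-- B replaces A's short-circuiting elif chain with a budgeted recursion that computes all matching keyword categories per trait and selects the minimum-index one from a phrase table (alternative decomposition, same cost).


-- ===== PORT A =====
-- one loop iteration of A: the elif chain, appending to voice_elements
def pvStepA (acc : List String) (trait : String) : List String :=
  let tl := PySem.Str.lower trait
  if PySem.Str.isIn "simple" tl || PySem.Str.isIn "easy" tl then acc ++ ["clear and straightforward"]
  else if PySem.Str.isIn "professional" tl then acc ++ ["professional and authoritative"]
  else if PySem.Str.isIn "friendly" tl || PySem.Str.isIn "warm" tl then acc ++ ["friendly and approachable"]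
  else if PySem.Str.isIn "efficient" tl then acc ++ ["direct and efficient"]
  else acc

def generate_brand_voice_py (traits : List String) : String :=
  if traits.isEmpty then "Professional, helpful, and user-focused"
  else
    let ve := (PySem.List.slice traits none (some 3)).foldl pvStepA []
    let ve := if ve.isEmpty then ["professional", "helpful", "user-focused"] else ve
    PySem.Str.join ", " ve

-- ===== PORT B =====
def pvPhrases : List String :=
  ["clear and straightforward", "professional and authoritative",
   "friendly and approachable", "direct and efficient"]

def pvKeywords : List (String × Int) :=
  [("simple", 0), ("easy", 0), ("professional", 1), ("friendly", 2), ("warm", 2), ("efficient", 3)]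

-- _collect: recursion with a budget; per trait all matching categories, min-index selection
def pvCollect : List String → Nat → List String
  | _, 0 => []
  | [], _ => []
  | t :: rest, Nat.succ b =>
    let tl := PySem.Str.lower t
    let cats := pvKeywords.filterMap (fun kc => if PySem.Str.isIn kc.1 tl then some kc.2 else none)
    let head := match PySem.List.min? cats (fun c => c) with
      | some m => (PySem.List.pyGet? pvPhrases m).toList
      | none => []
    head ++ pvCollect rest b

def generate_brand_voice_py_alt (traits : List String) : String :=
  if traits.isEmpty then "Professional, helpful, and user-focused"
  else
    let parts := pvCollect traits 3
    let parts := if parts.isEmpty then ["professional", "helpful", "user-focused"] else parts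
    PySem.Str.join ", " parts

-- ===== PRECONDITION & SPEC =====
def Spec_generate_brand_voice_py (traits : List String) (out : String) : Prop := out = generate_brand_voice_py_alt traits
instance (traits : List String) (out : String) : Decidable (Spec_generate_brand_voice_py traits out) := by unfold Spec_generate_brand_voice_py; infer_instance

-- ===== CLAIM (what is proved, stated in full; the proofs are below) =====
def Claim_equal_generate_brand_voice_py : Prop := ∀ (traits : List String), Dom_generate_brand_voice_py traits → Spec_generate_brand_voice_py traits (generate_brand_voice_py traits)

-- ===== LEMMAS AND PROOFS =====
-- B's per-trait chunk (the 'head' list of pvCollect)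
def pvChunk (t : String) : List String :=
  let tl := PySem.Str.lower t
  let cats := pvKeywords.filterMap (fun kc => if PySem.Str.isIn kc.1 tl then some kc.2 else none)
  match PySem.List.min? cats (fun c => c) with
  | some m => (PySem.List.pyGet? pvPhrases m).toList
  | none => []

-- per trait, A's elif step appends exactly B's min-category chunk
theorem pvStepA_eq (acc : List String) (t : String) :
    pvStepA acc t = acc ++ pvChunk t := by
  unfold pvStepA pvChunk pvKeywords
  simp only [List.filterMap]
  generalize PySem.Str.lower t = tl
  generalize PySem.Str.isIn "simple" tl = b1
  generalize PySem.Str.isIn "easy" tl = b2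
  generalize PySem.Str.isIn "professional" tl = b3
  generalize PySem.Str.isIn "friendly" tl = b4
  generalize PySem.Str.isIn "warm" tl = b5
  generalize PySem.Str.isIn "efficient" tl = b6
  cases b1 <;> cases b2 <;> cases b3 <;> cases b4 <;> cases b5 <;> cases b6 <;> simp [PySem.List.min?, PySem.List.pyGet?, PySem.List.pyIdx?, pvPhrases]

theorem pvCollect_eq (l : List String) (n : Nat) :
    pvCollect l n = (l.take n).foldl pvStepA [] := by
  suffices h : ∀ (l : List String) (n : Nat) (acc : List String),
      (l.take n).foldl pvStepA acc = acc ++ pvCollect l n by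
    simpa using (h l n []).symm
  intro l
  induction l with
  | nil => intro n acc; cases n <;> simp [pvCollect]
  | cons t rest ih =>
    intro n acc
    cases n with
    | zero => simp [pvCollect]
    | succ b =>
      simp only [List.take_succ_cons, List.foldl_cons, ih, pvStepA_eq, pvCollect]
      simp [pvChunk]

theorem slice3_eq (l : List String) : PySem.List.slice l none (some 3) = l.take 3 := by
  simpa using PySem.List.slice_to_natCast l 3

-- ===== VERDICT (by name: the statement is the Claim_ definition above) =====
theorem generate_brand_voice_py_spec : Claim_equal_generate_brand_voice_py := by
  intro traits _
  unfold Spec_generate_brand_voice_py generate_brand_voice_py generate_brand_voice_py_alt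
  simp only [slice3_eq, ← pvCollect_eq]
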